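-- pv_equiv track=rewrite | github.com/Soffira/Tests | hard_Calc.py | polish_rec
-- ===== SOURCE A (Python) =====
-- def polish_rec(example):
--     ints = []
--     signs = []
--     num_less = len(example)
--     num = ''
--     sign = ''
--     for i in example:
--         num_less -= 1
--         if i.isdigit() and num_less != 0:
--             num += i
--         elif i.isdigit() and num_less == 0:
--             num += i
--             ints.append(num)
--         elif i == '.':
--              num += i
--         else:
--             ints.append(num)
--             num = ''
--             signs.append(i)
--     result = (' '.join(ints) + ' ' + ' '.join(signs))
--     # return ints, signs
--     return result
-- ===== SOURCE B (Python) =====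
-- def polish_rec(example):
--     # Scan for each separator (non-digit, non-dot), slice the token before it,
--     # then continue on the remainder; a trailing token is kept only when the
--     # string ends with a digit.
--     ints = []
--     signs = []
--     s = example
--     while True:
--         j = next((k for k, c in enumerate(s) if not c.isdigit() and c != '.'), None)
--         if j is None:
--             break
--         ints.append(s[:j])
--         signs.append(s[j])
--         s = s[j + 1:]
--     if s and s[-1].isdigit():
--         ints.append(s)
--     return ' '.join(ints) + ' ' + ' '.join(signs)
-- ===== Notes on version B (the rewrite author's own statement) =====
-- stated objective: alternative
-- what changed: B repeatedly finds the next separator (non-digit, non-dot) and slices the token before it out of the remaining string, instead of A's single per-char scan that accumulates a number string under a countdown counter; the trailing token is kept only when the string ends with a digit.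
import Mathlib
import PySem

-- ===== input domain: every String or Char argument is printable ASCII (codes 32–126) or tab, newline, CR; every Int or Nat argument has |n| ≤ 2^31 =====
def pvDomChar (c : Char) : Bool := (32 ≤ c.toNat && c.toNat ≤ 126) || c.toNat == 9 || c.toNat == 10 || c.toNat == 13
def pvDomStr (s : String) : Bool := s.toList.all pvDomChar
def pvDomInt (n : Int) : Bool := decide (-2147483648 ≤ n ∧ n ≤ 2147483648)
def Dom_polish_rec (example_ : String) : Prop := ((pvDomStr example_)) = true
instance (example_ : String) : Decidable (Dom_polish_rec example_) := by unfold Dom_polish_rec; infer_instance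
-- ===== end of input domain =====

-- B scans for each separator and slices tokens out (find/slice loop) instead of A's
-- per-char accumulator with a countdown; objective: alternative algorithm, same cost.

-- ===== PORT A =====
-- one loop iteration of A: state (ints, signs, num_less, num); strings kept as List Char
-- (Python 'num += i' / "''.join"-style concatenation is exact on toList).
def pvStepA (st : List (List Char) × List Char × Int × List Char) (i : Char) :
    List (List Char) × List Char × Int × List Char :=
  let ints := st.1
  let signs := st.2.1
  let num_less := st.2.2.1 - 1
  let num := st.2.2.2
  if PySem.Chars.isdigit i && num_less != 0 then (ints, signs, num_less, num ++ [i])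
  else if PySem.Chars.isdigit i && num_less == 0 then (ints ++ [num ++ [i]], signs, num_less, num ++ [i])
  else if i == '.' then (ints, signs, num_less, num ++ [i])
  else (ints ++ [num], signs ++ [i], num_less, [])

def polish_rec (example_ : String) : String :=
  let cs := example_.toList
  let st := cs.foldl pvStepA ([], [], (PySem.Str.len example_ : Int), [])
  -- ' '.join(ints) + ' ' + ' '.join(signs), computed on code points (exact)
  String.mk (PySem.Chars.join [' '] st.1 ++ [' '] ++ PySem.Chars.join [' '] (st.2.1.map (fun c => [c])))

-- ===== PORT B =====
def pvIsSep (c : Char) : Bool := !(PySem.Chars.isdigit c) && !(c == '.')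

-- the generator scan 'next((k for k,c in enumerate(s) if sep), None)' together with the
-- slices s[:j] and s[j+1:]: returns (s[:j], s[j], s[j+1:]) for the first separator
def pvFindSep : List Char → Option (List Char × Char × List Char)
  | [] => none
  | c :: rest =>
    if pvIsSep c then some ([], c, rest)
    else
      match pvFindSep rest with
      | some (pre, d, post) => some (c :: pre, d, post)
      | none => none

theorem pvFindSep_post_lt (s : List Char) (pre : List Char) (d : Char) (post : List Char)
    (h : pvFindSep s = some (pre, d, post)) : post.length < s.length := by
  induction s generalizing pre with
  | nil => simp [pvFindSep] at h
  | cons c rest ih =>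
    simp only [pvFindSep] at h
    by_cases hc : pvIsSep c
    · simp [hc] at h
      simp [← h.2.2]
    · simp [hc] at h
      cases hfs : pvFindSep rest with
      | none => rw [hfs] at h; simp at h
      | some t =>
        obtain ⟨p, d', q⟩ := t
        rw [hfs] at h
        simp at h
        have := ih p (by rw [hfs, h.2.1, h.2.2])
        simp only [List.length_cons]
        omega

-- B's while loop: repeatedly cut at the first separator; keep the final remainder
-- only when it is non-empty and ends in a digit (s[-1].isdigit()).
def pvSplitB (s : List Char) : List (List Char) × List Char :=
  match h : pvFindSep s with
  | some (pre, d, post) =>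
    let r := pvSplitB post
    (pre :: r.1, d :: r.2)
  | none =>
    match s.getLast? with
    | some c => if PySem.Chars.isdigit c then ([s], []) else ([], [])
    | none => ([], [])
termination_by s.length
decreasing_by exact pvFindSep_post_lt s pre d post h

def polish_rec_alt (example_ : String) : String :=
  let r := pvSplitB example_.toList
  String.mk (PySem.Chars.join [' '] r.1 ++ [' '] ++ PySem.Chars.join [' '] (r.2.map (fun c => [c])))

-- ===== PRECONDITION & SPEC =====
def Spec_polish_rec (example_ : String) (out : String) : Prop := out = polish_rec_alt example_
instance (example_ : String) (out : String) : Decidable (Spec_polish_rec example_ out) := by unfold Spec_polish_rec; infer_instance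

-- ===== CLAIM (what is proved, stated in full; the proofs are below) =====
def Claim_equal_polish_rec : Prop := ∀ (example_ : String), Dom_polish_rec example_ → Spec_polish_rec example_ (polish_rec example_)

-- ===== LEMMAS AND PROOFS =====

-- prepend the pending accumulator to the first token (A flushes it there)
def pvGlue (num : List Char) : List (List Char) → List (List Char)
  | [] => []
  | t :: ts => (num ++ t) :: ts

theorem pvGlue_nil (l : List (List Char)) : pvGlue [] l = l := by
  cases l <;> simp [pvGlue]

theorem pvSplitB_of_some (s pre : List Char) (d : Char) (post : List Char)
    (h : pvFindSep s = some (pre, d, post)) :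
    pvSplitB s = (pre :: (pvSplitB post).1, d :: (pvSplitB post).2) := by
  rw [pvSplitB]
  split
  · rename_i pre' d' post' heq
    rw [h] at heq
    injection heq with heq
    injection heq with h1 heq
    injection heq with h2 h3
    subst h1; subst h2; subst h3; rfl
  · rename_i heq
    rw [h] at heq
    exact absurd heq (by simp)

theorem pvSplitB_of_none (s : List Char) (h : pvFindSep s = none) :
    pvSplitB s =
      match s.getLast? with
      | some c => if PySem.Chars.isdigit c then ([s], []) else ([], [])
      | none => ([], []) := by
  rw [pvSplitB]
  split
  · rename_i pre d post heq
    rw [h] at heq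
    exact absurd heq (by simp)
  · rfl

theorem pvSplitB_nil : pvSplitB [] = ([], []) := by
  rw [pvSplitB_of_none [] rfl]
  rfl

-- head-recursion characterisation of pvSplitB
theorem pvSplitB_cons (c : Char) (rest : List Char) :
    pvSplitB (c :: rest) =
      if pvIsSep c then ([] :: (pvSplitB rest).1, c :: (pvSplitB rest).2)
      else
        match (pvSplitB rest).1 with
        | [] => (if rest = [] ∧ PySem.Chars.isdigit c then [[c]] else [], (pvSplitB rest).2)
        | t :: ts => ((c :: t) :: ts, (pvSplitB rest).2) := by
  by_cases hc : pvIsSep c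
  · rw [pvSplitB_of_some (c :: rest) [] c rest (by simp [pvFindSep, hc])]
    simp [hc]
  · cases hfs : pvFindSep rest with
    | some t =>
      obtain ⟨pre, d, post⟩ := t
      rw [pvSplitB_of_some (c :: rest) (c :: pre) d post (by simp [pvFindSep, hc, hfs]),
          pvSplitB_of_some rest pre d post hfs]
      simp [hc]
    | none =>
      have hnone : pvFindSep (c :: rest) = none := by simp [pvFindSep, hc, hfs]
      rw [pvSplitB_of_none _ hnone, pvSplitB_of_none rest hfs]
      cases hr : rest with
      | nil =>
        by_cases hd : PySem.Chars.isdigit c <;> simp [hd, hc]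
      | cons r rs =>
        have hlast : (c :: r :: rs).getLast? = (r :: rs).getLast? := by
          simp
        rw [hlast]
        cases hg : (r :: rs).getLast? with
        | none => simp at hg
        | some g =>
          by_cases hgd : PySem.Chars.isdigit g <;> simp [hc, hgd]

-- c not a separator and not a digit means c is '.'
theorem pvDotChar (c : Char) (hc : ¬ pvIsSep c = true) (hd : ¬ PySem.Chars.isdigit c = true) :
    (c == '.') = true := by
  simp [pvIsSep, hd] at hc
  simp [hc]

-- main loop invariant: A's fold from counter = |s| produces B's split, appended
theorem pvLoopA (s : List Char) : ∀ (ints : List (List Char)) (signs : List Char) (num : List Char),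
    ∃ r : Int × List Char,
      s.foldl pvStepA (ints, signs, (s.length : Int), num)
        = (ints ++ pvGlue num (pvSplitB s).1, signs ++ (pvSplitB s).2, r.1, r.2) := by
  induction s with
  | nil =>
    intro ints signs num
    refine ⟨(0, num), ?_⟩
    simp [pvSplitB_nil, pvGlue]
  | cons c rest ih =>
    intro ints signs num
    have hstep : ∀ st, (c :: rest).foldl pvStepA st = rest.foldl pvStepA (pvStepA st c) :=
      fun st => rfl
    have hcount : ((c :: rest).length : Int) - 1 = (rest.length : Int) := by
      simp only [List.length_cons]
      push_cast
      ring
    rw [pvSplitB_cons]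
    by_cases hc : pvIsSep c
    · -- separator: flush num, emit sign, reset
      have hd : PySem.Chars.isdigit c = false := by
        by_contra hcon
        simp [pvIsSep] at hc hcon
        rw [hcon] at hc
        simp at hc
      have hdot : (c == '.') = false := by
        simp [pvIsSep] at hc
        simp [hc.2]
      rw [hstep]
      have hst : pvStepA (ints, signs, ((c :: rest).length : Int), num) c
          = (ints ++ [num], signs ++ [c], (rest.length : Int), []) := by
        simp [pvStepA, hd, hdot]
      rw [hst]
      obtain ⟨r, hr⟩ := ih (ints ++ [num]) (signs ++ [c]) []
      rw [pvGlue_nil] at hr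
      refine ⟨r, ?_⟩
      rw [hr]
      simp [hc, pvGlue]
    · -- c is a digit or '.'
      by_cases hrest : rest = []
      · subst hrest
        by_cases hd : PySem.Chars.isdigit c
        · -- last char, digit: flush num ++ [c]
          rw [hstep]
          have hst : pvStepA (ints, signs, (([c] : List Char).length : Int), num) c
              = (ints ++ [num ++ [c]], signs, 0, num ++ [c]) := by
            simp [pvStepA, hd]
          rw [hst]
          refine ⟨(0, num ++ [c]), ?_⟩
          simp [hc, hd, pvSplitB_nil, pvGlue]
        · -- last char '.': accumulate, never flushed
          have hdot := pvDotChar c hc hd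
          rw [hstep]
          have hst : pvStepA (ints, signs, (([c] : List Char).length : Int), num) c
              = (ints, signs, 0, num ++ [c]) := by
            simp [pvStepA, hd, hdot]
          rw [hst]
          refine ⟨(0, num ++ [c]), ?_⟩
          simp [hc, hd, pvSplitB_nil, pvGlue]
      · -- rest nonempty: accumulate c into num and recurse
        have hne : ((rest.length : Int) != 0) = true := by
          have : 0 < rest.length := List.length_pos_iff.mpr hrest
          simp; omega
        rw [hstep]
        have hst : pvStepA (ints, signs, ((c :: rest).length : Int), num) c
            = (ints, signs, (rest.length : Int), num ++ [c]) := by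
          by_cases hd : PySem.Chars.isdigit c
          · simp [pvStepA, hd, hne]
          · have hdot := pvDotChar c hc hd
            simp [pvStepA, hd, hdot]
        rw [hst]
        obtain ⟨r, hr⟩ := ih ints signs (num ++ [c])
        refine ⟨r, ?_⟩
        rw [hr]
        cases hsp : (pvSplitB rest).1 with
        | nil => simp [hc, hrest, pvGlue]
        | cons t ts => simp [hc, pvGlue]

-- ===== VERDICT (by name: the statement is the Claim_ definition above) =====
theorem polish_rec_spec : Claim_equal_polish_rec := by
  intro example_ _
  unfold Spec_polish_rec polish_rec polish_rec_alt
  obtain ⟨r, hr⟩ := pvLoopA example_.toList [] [] []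
  have hlen : (PySem.Str.len example_ : Int) = (example_.toList.length : Int) := by
    simp [PySem.Str.len]
  simp only [hlen, hr, List.nil_append, pvGlue_nil]
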